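-- pv_equiv track=rewrite | github.com/Saper37/Showcase | common files/eulotfunc.py | picksizes
-- ===== SOURCE A (Python) =====
-- def picksizes( qv ):
-- 	col = [ ]
-- 	for row in qv:
-- 		token = row[ 0 ].rsplit( " ")
-- 		while len( col ) < len( token ) + 1:
-- 			col.append( [ ] )
-- 		col[ len( token ) ].append( row )
-- 	return col
-- ===== SOURCE B (Python) =====
-- def picksizes(qv):
--     counts = [len(row[0].rsplit(" ")) for row in qv]
--     n = 0 if not counts else max(counts) + 1
--     return [[row for row, k in zip(qv, counts) if k == i] for i in range(n)]
-- ===== Notes on version B (the rewrite author's own statement) =====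
-- stated objective: alternative
-- what changed: Replaces A's single-pass bucketing into an in-place growing list (with a while-loop that pads the list) by two staged passes: first compute every row's token count and the bucket count n = max+1, then build each bucket i by filtering the rows whose count equals i; Pre_ excludes inputs containing an empty inner row, on which both A and B raise IndexError.
import Mathlib
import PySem

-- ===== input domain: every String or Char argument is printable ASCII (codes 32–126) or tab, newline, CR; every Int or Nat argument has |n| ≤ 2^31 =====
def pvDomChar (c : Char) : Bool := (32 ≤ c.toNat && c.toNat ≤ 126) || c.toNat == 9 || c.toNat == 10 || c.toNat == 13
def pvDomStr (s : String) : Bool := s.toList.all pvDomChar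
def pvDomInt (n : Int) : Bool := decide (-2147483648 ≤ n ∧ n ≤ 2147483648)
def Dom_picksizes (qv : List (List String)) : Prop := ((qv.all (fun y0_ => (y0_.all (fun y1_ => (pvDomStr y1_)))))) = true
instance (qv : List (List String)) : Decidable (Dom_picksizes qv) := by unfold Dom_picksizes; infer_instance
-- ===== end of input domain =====

-- B replaces A's single-pass bucketing into an in-place growing list by two staged passes:
-- count tokens per row and compute n = max+1, then build bucket i by filtering rows whose
-- count equals i (objective: alternative; no speed claim).

-- shared by both ports: len(row[0].rsplit(" ")); rsplit(" ") with no maxsplit is exactly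
-- str.split(" ") = PySem.Str.split? (some, since the separator is nonempty); row[0] is
-- pyGetD row 0 "" — Pre_ excludes empty rows, where Python raises IndexError
def pvTok (row : List String) : Nat :=
  ((PySem.Str.split? (PySem.List.pyGetD row 0 "") " ").getD []).length

-- ===== PORT A =====
-- while len(col) < n: col.append([])
def pvExtend (col : List (List (List String))) (n : Nat) :
    List (List (List String)) :=
  if col.length < n then pvExtend (col ++ [[]]) n else col
termination_by n - col.length
decreasing_by simp_all; omega

-- loop body of A
def pvStepA (col : List (List (List String))) (row : List String) :
    List (List (List String)) :=
  let ext := pvExtend col (pvTok row + 1)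
  ext.set (pvTok row) (ext.getD (pvTok row) [] ++ [row])

def picksizes (qv : List (List String)) : List (List (List String)) :=
  qv.foldl pvStepA []

-- ===== PORT B =====
-- counts = [len(row[0].rsplit(" ")) for row in qv]; n = 0 if not counts else max(counts)+1;
-- [[row for row, k in zip(qv, counts) if k == i] for i in range(n)]
def picksizes_alt (qv : List (List String)) : List (List (List String)) :=
  let counts := qv.map (fun row => pvTok row)
  let n := match counts with
    | [] => 0
    | c :: cs => cs.foldl max c + 1
  (List.range n).map (fun i => ((qv.zip counts).filter (fun p => p.2 == i)).map Prod.fst)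

-- ===== PRECONDITION & SPEC =====
-- Pre_ excludes only the inputs on which Python A raises IndexError (an empty inner row).
def Pre_picksizes (qv : List (List String)) : Prop := ∀ row ∈ qv, row ≠ []
instance (qv : List (List String)) : Decidable (Pre_picksizes qv) := by
  unfold Pre_picksizes; infer_instance

def pvWitness_picksizes : List (List String) := [["a b c", "x"], ["d"], ["a  b"]]

def Spec_picksizes (qv : List (List String)) (out : List (List (List String))) : Prop :=
  out = picksizes_alt qv
instance (qv : List (List String)) (out : List (List (List String))) :
    Decidable (Spec_picksizes qv out) := by unfold Spec_picksizes; infer_instance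

-- ===== CLAIM (what is proved, stated in full; the proofs are below) =====
def Claim_equal_picksizes : Prop :=
  ∀ (qv : List (List String)), Dom_picksizes qv → Pre_picksizes qv →
    Spec_picksizes qv (picksizes qv)

-- ===== LEMMAS AND PROOFS =====

-- canonical form both ports are reduced to: n buckets, bucket i = rows with count i
def pvG (qv : List (List String)) (n : Nat) : List (List (List String)) :=
  (List.range n).map (fun i => qv.filter (fun r => pvTok r == i))

def pvM (qv : List (List String)) : Nat :=
  qv.foldl (fun acc r => max acc (pvTok r + 1)) 0

theorem pvM_init_le (qv : List (List String)) (a : Nat) :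
    a ≤ qv.foldl (fun acc r => max acc (pvTok r + 1)) a := by
  induction qv generalizing a with
  | nil => simp
  | cons r rs ih => exact le_trans (Nat.le_max_left _ _) (ih _)

theorem pvTok_lt_pvM (qv : List (List String)) (a : Nat) (r : List String)
    (hr : r ∈ qv) : pvTok r < qv.foldl (fun acc x => max acc (pvTok x + 1)) a := by
  induction qv generalizing a with
  | nil => cases hr
  | cons x xs ih =>
    rcases List.mem_cons.mp hr with h | h
    · subst h
      calc pvTok r < max a (pvTok r + 1) :=
            Nat.lt_of_lt_of_le (Nat.lt_succ_self _) (Nat.le_max_right _ _)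
        _ ≤ _ := pvM_init_le xs _
    · exact ih _ h

theorem pvExtend_eq (col : List (List (List String))) (n : Nat) :
    pvExtend col n = col ++ List.replicate (n - col.length) [] := by
  unfold pvExtend
  split
  · rename_i h
    rw [pvExtend_eq (col ++ [[]]) n, List.append_assoc]
    congr 1
    have h1 : n - col.length = (n - (col.length + 1)) + 1 := by omega
    rw [h1, List.replicate_succ]
    simp
  · rename_i h
    have h0 : n - col.length = 0 := by omega
    simp [h0]
termination_by n - col.length
decreasing_by simp_all; omega

theorem pvG_extend (qv : List (List String)) (m : Nat) (h : pvM qv ≤ m) :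
    pvG qv (pvM qv) ++ List.replicate (m - pvM qv) [] = pvG qv m := by
  unfold pvG
  have hm : m = pvM qv + (m - pvM qv) := by omega
  rw [hm, List.range_add, List.map_append]
  congr 1
  symm
  rw [List.eq_replicate_iff]
  refine ⟨by simp, ?_⟩
  intro b hb
  simp only [List.map_map, List.mem_map, List.mem_range, Function.comp] at hb
  obtain ⟨i, hi, rfl⟩ := hb
  rw [List.filter_eq_nil_iff]
  intro r hr
  have h2 : pvTok r < pvM qv := pvTok_lt_pvM qv 0 r hr
  simp only [beq_iff_eq]
  omega

theorem pvG_getD (qv : List (List String)) (m k : Nat) (hk : k < m) :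
    (pvG qv m).getD k [] = qv.filter (fun r => pvTok r == k) := by
  unfold pvG
  rw [List.getD_eq_getElem?_getD, List.getElem?_map]
  simp [hk]

theorem pvG_set (qv : List (List String)) (a : List String) (m : Nat)
    (_hk : pvTok a < m) :
    (pvG qv m).set (pvTok a) (qv.filter (fun r => pvTok r == pvTok a) ++ [a]) =
      pvG (qv ++ [a]) m := by
  unfold pvG
  apply List.ext_getElem
  · simp
  · intro i h1 h2
    simp only [List.getElem_set, List.getElem_map, List.getElem_range,
      List.filter_append]
    by_cases hik : i = pvTok a
    · subst hik
      rw [if_pos rfl]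
      simp
    · rw [if_neg (fun h => hik h.symm)]
      have : (pvTok a == i) = false := by simp; omega
      simp [List.filter, this]

theorem pvM_append (qv : List (List String)) (a : List String) :
    pvM (qv ++ [a]) = max (pvM qv) (pvTok a + 1) := by
  unfold pvM
  rw [List.foldl_append]
  rfl

theorem pvStepA_eq (qv : List (List String)) (a : List String) :
    pvStepA (pvG qv (pvM qv)) a = pvG (qv ++ [a]) (pvM (qv ++ [a])) := by
  unfold pvStepA
  simp only
  have hlen : (pvG qv (pvM qv)).length = pvM qv := by simp [pvG]
  have hm1 := Nat.le_max_left (pvM qv) (pvTok a + 1)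
  have hm2 := Nat.le_max_right (pvM qv) (pvTok a + 1)
  have he : pvTok a + 1 - (pvG qv (pvM qv)).length =
      max (pvM qv) (pvTok a + 1) - pvM qv := by rw [hlen]; omega
  rw [pvExtend_eq, he, pvG_extend qv _ hm1]
  have hk : pvTok a < max (pvM qv) (pvTok a + 1) := by omega
  rw [pvG_getD qv _ _ hk, pvG_set qv a _ hk, pvM_append]

theorem picksizes_eq_pvG (qv : List (List String)) :
    picksizes qv = pvG qv (pvM qv) := by
  induction qv using List.reverseRecOn with
  | nil => simp [picksizes, pvG, pvM]
  | append_singleton l a ih =>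
    unfold picksizes at *
    rw [List.foldl_append, List.foldl_cons, List.foldl_nil, ih, pvStepA_eq]

theorem pvMax_shift (ts : List Nat) (c : Nat) :
    ts.foldl max c + 1 = ts.foldl (fun acc t => max acc (t + 1)) (c + 1) := by
  induction ts generalizing c with
  | nil => rfl
  | cons t ts ih =>
    simp only [List.foldl_cons]
    rw [ih]
    congr 1
    exact (Nat.succ_max_succ c t).symm

theorem pvM_eq_alt (qv : List (List String)) :
    (match qv.map (fun row => pvTok row) with
      | [] => 0
      | c :: cs => cs.foldl max c + 1) = pvM qv := by
  cases qv with
  | nil => rfl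
  | cons r rs =>
    simp only [List.map_cons]
    rw [pvMax_shift, List.foldl_map]
    unfold pvM
    rw [List.foldl_cons]
    congr 1

theorem pvBucket_eq (qv : List (List String)) (i : Nat) :
    ((qv.zip (qv.map (fun row => pvTok row))).filter (fun p => p.2 == i)).map
      Prod.fst = qv.filter (fun r => pvTok r == i) := by
  induction qv with
  | nil => rfl
  | cons r rs ih =>
    simp only [List.map_cons, List.zip_cons_cons, List.filter]
    by_cases h : (pvTok r == i) = true
    · simp only [h, List.map_cons, ih]
    · simp only [Bool.not_eq_true] at h
      simp only [h, ih]

theorem picksizes_alt_eq_pvG (qv : List (List String)) :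
    picksizes_alt qv = pvG qv (pvM qv) := by
  unfold picksizes_alt pvG
  simp only [pvM_eq_alt]
  congr 1
  funext i
  exact pvBucket_eq qv i

-- ===== VERDICT (by name: the statement is the Claim_ definition above) =====
theorem picksizes_spec : Claim_equal_picksizes := by
  intro qv _ _
  unfold Spec_picksizes
  rw [picksizes_eq_pvG, picksizes_alt_eq_pvG]
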